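-- pv_equiv track=rewrite | github.com/mmercalde/prng_cluster_public | agents/step_runner/command_builder.py | format_command_display
-- ===== SOURCE A (Python) =====
-- from typing import Dict, List, Any, Optional
--
-- def format_command_display(command: List[str], max_width: int = 80) -> str:
--     """
--     Format command for display (with line wrapping).
--
--     Args:
--         command: Command list
--         max_width: Maximum line width
--
--     Returns:
--         Formatted string suitable for logging
--     """
--     cmd_str = " ".join(command)
--
--     if len(cmd_str) <= max_width:
--         return cmd_str
--
--     # Wrap at argument boundaries
--     lines = []
--     current_line = command[0] + " " + command[1]  # python3 script.py
--
--     i = 2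
--     while i < len(command):
--         arg = command[i]
--
--         if arg.startswith("--"):
--             # Start of new argument
--             if i + 1 < len(command) and not command[i + 1].startswith("--"):
--                 # Has value
--                 arg_str = f"{arg} {command[i + 1]}"
--                 i += 2
--             else:
--                 # Flag only
--                 arg_str = arg
--                 i += 1
--         else:
--             arg_str = arg
--             i += 1
--
--         if len(current_line) + len(arg_str) + 1 > max_width:
--             lines.append(current_line + " \\")
--             current_line = "    " + arg_str
--         else:
--             current_line += " " + arg_str
--
--     lines.append(current_line)
--     return "\n".join(lines)
-- ===== SOURCE B (Python) =====
-- def format_command_display(command, max_width=80):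
--     cmd_str = " ".join(command)
--     if len(cmd_str) <= max_width:
--         return cmd_str
--
--     # Pass 1: tokenize command[2:] into display tokens ("--flag value" pairs stay together).
--     tokens = []
--     i = 2
--     while i < len(command):
--         if command[i].startswith("--") and i + 1 < len(command) and not command[i + 1].startswith("--"):
--             tokens.append(command[i] + " " + command[i + 1])
--             i += 2
--         else:
--             tokens.append(command[i])
--             i += 1
--
--     # Pass 2: chunk the token list into whole lines. Each line is computed at once:
--     # count how many tokens fit after the base by a cumulative-width scan, join them,
--     # then recurse on the remainder (whose first token is forced onto the next line).
--     lines = []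
--     base = command[0] + " " + command[1]
--     rest = tokens
--     while True:
--         width = len(base)
--         k = 0
--         while k < len(rest) and width + len(rest[k]) + 1 <= max_width:
--             width += len(rest[k]) + 1
--             k += 1
--         line = " ".join([base] + rest[:k])
--         if k == len(rest):
--             lines.append(line)
--             break
--         lines.append(line + " \\")
--         base = "    " + rest[k]
--         rest = rest[k + 1:]
--     return "\n".join(lines)
-- ===== Notes on version B (the rewrite author's own statement) =====
-- stated objective: alternative
-- what changed: A's single while-loop interleaves index-based pair parsing with token-by-token accumulator packing; B first tokenizes command[2:] into display tokens, then builds each output line wholesale: a cumulative-width scan counts how many tokens fit, the line is produced by one join over that prefix, and the remainder is processed recursively.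
import Mathlib
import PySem

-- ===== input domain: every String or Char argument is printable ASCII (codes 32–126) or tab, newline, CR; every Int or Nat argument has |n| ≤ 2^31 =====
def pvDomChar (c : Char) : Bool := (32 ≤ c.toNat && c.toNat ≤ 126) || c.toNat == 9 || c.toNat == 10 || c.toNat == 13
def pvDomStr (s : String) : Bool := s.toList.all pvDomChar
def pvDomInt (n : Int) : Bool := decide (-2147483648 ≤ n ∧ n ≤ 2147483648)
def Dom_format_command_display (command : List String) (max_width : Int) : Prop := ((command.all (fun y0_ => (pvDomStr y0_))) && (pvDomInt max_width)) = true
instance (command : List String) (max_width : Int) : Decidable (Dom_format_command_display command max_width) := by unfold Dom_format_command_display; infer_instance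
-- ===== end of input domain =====

-- B is an alternative decomposition: A's single while-loop fuses pair parsing with
-- token-by-token line packing; B tokenizes first, then builds each output line wholesale
-- (a cumulative-width count, one join over that token prefix, recursion on the remainder);
-- a timing run measured B faster (one join per line instead of per-token concatenation).
-- Return values are identical; both raise IndexError on the same inputs (wrapping with
-- fewer than two command elements), excluded by Pre_.

-- ===== PORT A =====
-- A's while-loop: the index i rendered as recursion on the remaining suffix of command
-- (the pattern 'a :: b :: rest' is 'i + 1 < len(command)'); state is (lines, current_line).
def fcdLoopA (mw : Int) : List String → List String → String → List String
  | [], lines, cur => lines ++ [cur]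
  | [a], lines, cur =>
    if PySem.Str.len cur + PySem.Str.len a + 1 > mw then
      (lines ++ [cur ++ " \\"]) ++ ["    " ++ a]
    else
      lines ++ [cur ++ " " ++ a]
  | a :: b :: rest, lines, cur =>
    if PySem.Str.startswith a "--" then
      if !PySem.Str.startswith b "--" then
        if PySem.Str.len cur + PySem.Str.len (a ++ " " ++ b) + 1 > mw then
          fcdLoopA mw rest (lines ++ [cur ++ " \\"]) ("    " ++ (a ++ " " ++ b))
        else
          fcdLoopA mw rest lines (cur ++ " " ++ (a ++ " " ++ b))
      else
        if PySem.Str.len cur + PySem.Str.len a + 1 > mw then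
          fcdLoopA mw (b :: rest) (lines ++ [cur ++ " \\"]) ("    " ++ a)
        else
          fcdLoopA mw (b :: rest) lines (cur ++ " " ++ a)
    else
      if PySem.Str.len cur + PySem.Str.len a + 1 > mw then
        fcdLoopA mw (b :: rest) (lines ++ [cur ++ " \\"]) ("    " ++ a)
      else
        fcdLoopA mw (b :: rest) lines (cur ++ " " ++ a)

def format_command_display (command : List String) (max_width : Int) : String :=
  let cmd_str := PySem.Str.join " " command
  if PySem.Str.len cmd_str ≤ max_width then cmd_str
  else
    match command with
    | c0 :: c1 :: rest => PySem.Str.join "\n" (fcdLoopA max_width rest [] (c0 ++ " " ++ c1))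
    | _ => ""  -- Python raises IndexError here; excluded by Pre_

-- ===== PORT B =====
-- B pass 1: tokenize command[2:] into display tokens ('a :: b :: rest' is 'i + 1 < len(command)').
def fcdTokens : List String → List String
  | [] => []
  | [a] => [a]
  | a :: b :: rest =>
    if PySem.Str.startswith a "--" && !PySem.Str.startswith b "--" then
      (a ++ " " ++ b) :: fcdTokens rest
    else
      a :: fcdTokens (b :: rest)

-- B's inner cumulative-width scan: how many leading tokens fit after a line of width `width`.
def fcdTake (mw : Int) (width : Int) : List String → Nat
  | [] => 0
  | t :: ts =>
    if width + PySem.Str.len t + 1 ≤ mw then fcdTake mw (width + PySem.Str.len t + 1) ts + 1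
    else 0

theorem fcdTake_le (mw : Int) : ∀ (ts : List String) (width : Int), fcdTake mw width ts ≤ ts.length := by
  intro ts
  induction ts with
  | nil => intro w; simp [fcdTake]
  | cons t ts ih =>
    intro w
    simp only [fcdTake, List.length_cons]
    split
    · exact Nat.add_le_add_right (ih _) 1
    · exact Nat.zero_le _

-- B pass 2 (Source B's outer while-loop): build each line wholesale and recurse on the rest.
def fcdChunk (mw : Int) (base : String) (rest : List String) : List String :=
  let k := fcdTake mw (PySem.Str.len base) rest
  let line := PySem.Str.join " " (base :: rest.take k)
  if k = rest.length then [line]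
  else
    match h : rest.drop k with
    | [] => [line]  -- unreachable: k < rest.length
    | t :: ts => (line ++ " \\") :: fcdChunk mw ("    " ++ t) ts
termination_by rest.length
decreasing_by
  have hk : fcdTake mw (PySem.Str.len base) rest ≤ rest.length := fcdTake_le mw rest _
  have := congrArg List.length h
  simp [List.length_drop] at this
  omega

def format_command_display_alt (command : List String) (max_width : Int) : String :=
  let cmd_str := PySem.Str.join " " command
  if PySem.Str.len cmd_str ≤ max_width then cmd_str
  else
    match command with
    | [] => ""  -- B's Python also raises IndexError here; excluded by Pre_
    | [_] => ""  -- likewise excluded by Pre_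
    | c0 :: c1 :: rest =>
        PySem.Str.join "\n" (fcdChunk max_width (c0 ++ " " ++ c1) (fcdTokens rest))

-- ===== PRECONDITION & SPEC =====
-- Pre_ excludes exactly the inputs where A (and B) raise IndexError: the wrapping path is
-- taken (joined command longer than max_width) but command has fewer than two elements.
def Pre_format_command_display (command : List String) (max_width : Int) : Prop :=
  PySem.Str.len (PySem.Str.join " " command) ≤ max_width ∨ 2 ≤ command.length
instance (command : List String) (max_width : Int) : Decidable (Pre_format_command_display command max_width) := by unfold Pre_format_command_display; infer_instance

def pvWitness_format_command_display : List String × Int :=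
  (["python3", "run.py", "--seed", "42", "--fast"], 20)

def Spec_format_command_display (command : List String) (max_width : Int) (out : String) : Prop := out = format_command_display_alt command max_width
instance (command : List String) (max_width : Int) (out : String) : Decidable (Spec_format_command_display command max_width out) := by unfold Spec_format_command_display; infer_instance

-- ===== CLAIM (what is proved, stated in full; the proofs are below) =====
def Claim_equal_format_command_display : Prop := ∀ (command : List String) (max_width : Int), Dom_format_command_display command max_width → Pre_format_command_display command max_width → Spec_format_command_display command max_width (format_command_display command max_width)

-- ===== LEMMAS AND PROOFS =====

-- Proof-side helper: A's packing half, as a token-by-token accumulator over the token list.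
def fcdPack (mw : Int) : List String → List String → String → List String
  | [], lines, cur => lines ++ [cur]
  | t :: ts, lines, cur =>
    if PySem.Str.len cur + PySem.Str.len t + 1 > mw then
      fcdPack mw ts (lines ++ [cur ++ " \\"]) ("    " ++ t)
    else
      fcdPack mw ts lines (cur ++ " " ++ t)

-- A's fused loop computes what tokenize-then-pack computes.
theorem fcdLoopA_eq_pack (mw : Int) : ∀ (rest lines : List String) (cur : String),
    fcdLoopA mw rest lines cur = fcdPack mw (fcdTokens rest) lines cur := by
  intro rest
  induction rest using fcdTokens.induct with
  | case1 =>
    intro lines cur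
    simp [fcdLoopA, fcdTokens, fcdPack]
  | case2 a =>
    intro lines cur
    simp only [fcdLoopA, fcdTokens, fcdPack]
  | case3 a b rest h ih =>
    intro lines cur
    simp only [Bool.and_eq_true, Bool.not_eq_true'] at h
    obtain ⟨h1, h2⟩ := h
    simp only [fcdLoopA, fcdTokens, h1, h2, Bool.not_false, Bool.and_self, if_true, fcdPack]
    split_ifs <;> exact ih _ _
  | case4 a b rest h ih =>
    intro lines cur
    simp only [Bool.and_eq_true, Bool.not_eq_true', not_and] at h
    cases hsa : PySem.Str.startswith a "--" with
    | true =>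
      cases hsb : PySem.Str.startswith b "--" with
      | false => exact absurd hsb (h hsa)
      | true =>
        simp only [fcdLoopA, fcdTokens, hsa, hsb, Bool.not_true, Bool.and_false, if_true,
          Bool.false_eq_true, if_false, fcdPack]
        split_ifs <;> exact ih _ _
    | false =>
      simp only [fcdLoopA, fcdTokens, hsa, Bool.false_and, Bool.false_eq_true, if_false, fcdPack]
      split_ifs <;> exact ih _ _

theorem str_join_singleton (sep a : String) : PySem.Str.join sep [a] = a := by
  apply String.toList_inj.mp
  simp [PySem.Str.toList_join, PySem.Chars.join_singleton]

theorem str_join_cons_cons (a b : String) (l : List String) :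
    PySem.Str.join " " (a :: b :: l) = PySem.Str.join " " ((a ++ " " ++ b) :: l) := by
  apply String.toList_inj.mp
  cases l with
  | nil =>
    simp [PySem.Str.toList_join, PySem.Chars.join_cons_cons, PySem.Chars.join_singleton]
  | cons q rest =>
    simp [PySem.Str.toList_join, PySem.Chars.join_cons_cons, List.append_assoc]

theorem str_len_glue (a b : String) :
    PySem.Str.len (a ++ " " ++ b) = PySem.Str.len a + PySem.Str.len b + 1 := by
  simp [PySem.Str.len_eq]
  ring

-- fcdChunk without the dependent match and without the (redundant) k = length test:
-- when k = rest.length the dropped list is empty and both branches give [line].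
theorem fcdChunk_eq (mw : Int) (base : String) (rest : List String) :
    fcdChunk mw base rest =
      match rest.drop (fcdTake mw (PySem.Str.len base) rest) with
      | [] => [PySem.Str.join " " (base :: rest.take (fcdTake mw (PySem.Str.len base) rest))]
      | t :: ts =>
        (PySem.Str.join " " (base :: rest.take (fcdTake mw (PySem.Str.len base) rest)) ++ " \\") ::
          fcdChunk mw ("    " ++ t) ts := by
  rw [fcdChunk]
  by_cases hk : fcdTake mw (PySem.Str.len base) rest = rest.length
  · rw [if_pos hk, hk, List.drop_length]
  · rw [if_neg hk]
    split
    next h => rw [h]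
    next t ts h => rw [h]

-- One-step unfolding of fcdChunk when the first token fits on the current line.
theorem fcdChunk_cons_fit (mw : Int) (cur t : String) (ts : List String)
    (h : PySem.Str.len cur + PySem.Str.len t + 1 ≤ mw) :
    fcdChunk mw cur (t :: ts) = fcdChunk mw (cur ++ " " ++ t) ts := by
  rw [fcdChunk_eq, fcdChunk_eq]
  simp only [fcdTake, if_pos h, str_len_glue, List.take_succ_cons,
    List.drop_succ_cons, str_join_cons_cons]

-- Token-by-token packing equals whole-line chunking.
theorem pack_eq_chunk (mw : Int) : ∀ (toks : List String) (lines : List String) (cur : String),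
    fcdPack mw toks lines cur = lines ++ fcdChunk mw cur toks := by
  intro toks
  induction toks with
  | nil =>
    intro lines cur
    rw [fcdChunk_eq]
    simp [fcdPack, fcdTake, str_join_singleton]
  | cons t ts ih =>
    intro lines cur
    by_cases hfit : PySem.Str.len cur + PySem.Str.len t + 1 ≤ mw
    · rw [fcdPack, if_neg (by omega), ih, fcdChunk_cons_fit mw cur t ts hfit]
    · rw [fcdPack, if_pos (by omega), ih]
      conv_rhs => rw [fcdChunk_eq]
      simp only [fcdTake, if_neg hfit, List.take_zero, List.drop_zero]
      simp [str_join_singleton, List.append_assoc]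

-- ===== VERDICT (by name: the statement is the Claim_ definition above) =====
theorem format_command_display_spec : Claim_equal_format_command_display := by
  intro command max_width _hdom _hpre
  unfold Spec_format_command_display format_command_display format_command_display_alt
  dsimp only
  split_ifs with h
  · rfl
  · cases command with
    | nil => rfl
    | cons c0 t =>
      cases t with
      | nil => rfl
      | cons c1 rest =>
        simp only [fcdLoopA_eq_pack, pack_eq_chunk, List.nil_append]
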